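-- pv_equiv track=rewrite | github.com/rush-labs/advent-of-code-2024 | bjorn/19.py | analyze_designs
-- ===== SOURCE A (Python) =====
-- def count_construction_ways(design, patterns, memo=None):
--     if memo is None:
--         memo = {}
--
--     if not design:
--         return 1
--     if design in memo:
--         return memo[design]
--
--     total_ways = 0
--     for pattern in patterns:
--         if design.startswith(pattern):
--             remaining = design[len(pattern) :]
--             total_ways += count_construction_ways(remaining, patterns, memo)
--
--     memo[design] = total_ways
--     return total_ways
--
-- def analyze_designs(patterns, designs):
--     possible_count = 0
--     total_permutations = 0
--     design_ways = {}
--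
--     for design in designs:
--         ways = count_construction_ways(design, patterns)
--         if ways > 0:
--             possible_count += 1
--             total_permutations += ways
--         design_ways[design] = ways
--
--     return possible_count, total_permutations, design_ways
-- ===== SOURCE B (Python) =====
-- def analyze_designs(patterns, designs):
--     possible_count = 0
--     total_permutations = 0
--     design_ways = {}
--
--     for design in designs:
--         # bottom-up table over suffixes: dp[0] = ways for design[i:], built back-to-front
--         dp = [1]
--         for i in range(len(design) - 1, -1, -1):
--             total = 0
--             for p in patterns:
--                 if p and design[i:i + len(p)] == p:
--                     total += dp[len(p) - 1]
--             dp.insert(0, total)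
--         ways = dp[0]
--         if ways > 0:
--             possible_count += 1
--             total_permutations += ways
--         design_ways[design] = ways
--
--     return possible_count, total_permutations, design_ways
-- ===== Notes on version B (the rewrite author's own statement) =====
-- stated objective: alternative
-- what changed: Per design, A's memoized top-down recursion over suffix strings (threading a memo dict) is replaced by an iterative bottom-up DP table built back-to-front over suffix positions; the outer aggregation loop is unchanged.
import Mathlib
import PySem

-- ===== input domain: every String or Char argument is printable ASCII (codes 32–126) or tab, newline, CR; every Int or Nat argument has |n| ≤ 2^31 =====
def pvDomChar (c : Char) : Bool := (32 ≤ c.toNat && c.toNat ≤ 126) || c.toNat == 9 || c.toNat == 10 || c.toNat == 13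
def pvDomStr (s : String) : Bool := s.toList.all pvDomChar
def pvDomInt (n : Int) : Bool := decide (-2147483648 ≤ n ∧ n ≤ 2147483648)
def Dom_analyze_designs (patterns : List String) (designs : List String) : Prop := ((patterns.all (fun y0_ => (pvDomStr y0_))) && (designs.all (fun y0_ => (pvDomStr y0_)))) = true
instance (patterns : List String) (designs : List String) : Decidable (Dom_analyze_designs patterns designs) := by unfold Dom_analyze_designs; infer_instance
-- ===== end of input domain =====

-- B replaces A's memoized top-down recursion per design by a bottom-up suffix DP table
-- (objective: alternative decomposition; same results on all admitted inputs).

-- ===== PORT A =====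
-- count_construction_ways: memoized recursion threading the memo dict. The fuel
-- len(design)+1 bounds the recursion depth, which is exact whenever no pattern is empty
-- (with an empty pattern the Python recurses forever — excluded by Pre_), so the fuel-0
-- branch is unreachable on admitted inputs.
def pvCountA : Nat → String → List String → PySem.Dict String Int → Int × PySem.Dict String Int
  | 0, _, _, memo => (0, memo)
  | fuel+1, design, patterns, memo =>
    if design = "" then (1, memo)
    else
      match memo.get? design with
      | some v => (v, memo)
      | none =>
        let r := patterns.foldl (fun acc pattern =>
          if PySem.Str.startswith design pattern then
            let remaining := PySem.Str.slice design (some (PySem.Str.len pattern)) none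
            let res := pvCountA fuel remaining patterns acc.2
            (acc.1 + res.1, res.2)
          else acc) ((0 : Int), memo)
        (r.1, r.2.insert design r.1)

def analyze_designs (patterns : List String) (designs : List String) : Int × Int × (List (String × Int)) :=
  let r := designs.foldl (fun (acc : Int × Int × PySem.Dict String Int) design =>
    let ways := (pvCountA (design.toList.length + 1) design patterns PySem.Dict.empty).1
    let acc' := if ways > 0 then (acc.1 + 1, acc.2.1 + ways) else (acc.1, acc.2.1)
    (acc'.1, acc'.2, acc.2.2.insert design ways)) ((0 : Int), (0 : Int), PySem.Dict.empty)
  (r.1, r.2.1, r.2.2.items)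

-- ===== PORT B =====
-- bottom-up DP over suffixes: dp is built back-to-front, its head being the number of ways
-- to compose design[i:]; nonempty-pattern lookups dp[len(p)-1] are in range because the
-- slice equality forces len(p) ≤ n - i.
def pvWaysB (patterns : List String) (design : String) : Int :=
  let dp := (PySem.List.pyRange (PySem.Str.len design - 1) (-1) (-1)).foldl
    (fun dp i =>
      (patterns.foldl (fun total p =>
        if p ≠ "" ∧ PySem.Str.slice design (some i) (some (i + PySem.Str.len p)) = p
        then total + PySem.List.pyGetD dp (PySem.Str.len p - 1) 0
        else total) 0) :: dp)
    [(1 : Int)]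
  PySem.List.pyGetD dp 0 0

def analyze_designs_alt (patterns : List String) (designs : List String) : Int × Int × (List (String × Int)) :=
  let r := designs.foldl (fun (acc : Int × Int × PySem.Dict String Int) design =>
    let ways := pvWaysB patterns design
    let acc' := if ways > 0 then (acc.1 + 1, acc.2.1 + ways) else (acc.1, acc.2.1)
    (acc'.1, acc'.2, acc.2.2.insert design ways)) ((0 : Int), (0 : Int), PySem.Dict.empty)
  (r.1, r.2.1, r.2.2.items)

-- ===== PRECONDITION & SPEC =====
-- Pre_ excludes exactly the inputs on which A raises: with an empty pattern and any
-- nonempty design, count_construction_ways recurses forever on that design and Python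
-- raises RecursionError; A returns normally on every other input.
def Pre_analyze_designs (patterns : List String) (designs : List String) : Prop :=
  "" ∈ patterns → ∀ d ∈ designs, d = ""
instance (patterns : List String) (designs : List String) : Decidable (Pre_analyze_designs patterns designs) := by unfold Pre_analyze_designs; infer_instance

def pvWitness_analyze_designs : List String × List String := (["r", "wr", "b"], ["rwrb", "bw", ""])

def Spec_analyze_designs (patterns : List String) (designs : List String) (out : Int × Int × (List (String × Int))) : Prop := out = analyze_designs_alt patterns designs
instance (patterns : List String) (designs : List String) (out : Int × Int × (List (String × Int))) : Decidable (Spec_analyze_designs patterns designs out) := by unfold Spec_analyze_designs; infer_instance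

-- ===== CLAIM (what is proved, stated in full; the proofs are below) =====
def Claim_equal_analyze_designs : Prop := ∀ (patterns : List String) (designs : List String), Dom_analyze_designs patterns designs → Pre_analyze_designs patterns designs → Spec_analyze_designs patterns designs (analyze_designs patterns designs)

-- ===== LEMMAS AND PROOFS =====

def pvWaysF : Nat → List String → List Char → Int
  | 0, _, _ => 0
  | f+1, pats, d =>
    if d = [] then 1
    else (pats.map (fun p => if p.toList <+: d then pvWaysF f pats (d.drop p.toList.length) else 0)).sum
def pvW (pats : List String) (d : List Char) : Int := pvWaysF (d.length + 1) pats d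
lemma pvToList_ne_nil {p : String} (h : p ≠ "") : p.toList ≠ [] :=
  fun hc => h (String.toList_eq_nil_iff.mp hc)
lemma pvWaysF_fuel (pats : List String) (hne : ∀ p ∈ pats, p ≠ "") :
    ∀ f f' (d : List Char), d.length < f → d.length < f' → pvWaysF f pats d = pvWaysF f' pats d := by
  intro f
  induction f with
  | zero => intro f' d h; omega
  | succ g ih =>
    intro f' d hf hf'
    match f', hf' with
    | g'+1, hf' =>
      simp only [pvWaysF]
      by_cases hd : d = []
      · simp [hd]
      · simp only [hd, if_false]
        congr 1
        apply List.map_congr_left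
        intro p hp
        by_cases hpre : p.toList <+: d
        · have hlen := hpre.length_le
          have hpne : p.toList ≠ [] := pvToList_ne_nil (hne p hp)
          have hplen : 1 ≤ p.toList.length := List.length_pos_iff.mpr hpne
          simp only [hpre, if_true]
          rw [ih g' (d.drop p.toList.length) (by rw [List.length_drop]; omega) (by rw [List.length_drop]; omega)]
        · simp [hpre]
lemma pvWaysF_succ (f : Nat) (pats : List String) (d : List Char) :
    pvWaysF (f+1) pats d = if d = [] then 1
      else (pats.map (fun p => if p.toList <+: d then pvWaysF f pats (d.drop p.toList.length) else 0)).sum := rfl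
lemma pvW_unfold' (pats : List String) (hne : ∀ p ∈ pats, p ≠ "") (d : List Char) (hd : d ≠ []) :
    pvW pats d = (pats.map (fun p => if p.toList <+: d then pvW pats (d.drop p.toList.length) else 0)).sum := by
  unfold pvW
  rw [pvWaysF_succ]
  simp only [hd, if_false]
  congr 1
  apply List.map_congr_left
  intro p hp
  by_cases hpre : p.toList <+: d
  · have hlen := hpre.length_le
    have hplen : 1 ≤ p.toList.length := List.length_pos_iff.mpr (pvToList_ne_nil (hne p hp))
    simp only [hpre, if_true]
    exact pvWaysF_fuel pats hne d.length ((d.drop p.toList.length).length + 1) _ (by rw [List.length_drop]; omega) (by omega)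
  · simp [hpre]

def pvInv (pats : List String) (memo : PySem.Dict String Int) : Prop :=
  ∀ k v, memo.get? k = some v → v = pvW pats k.toList

lemma pvStartswith_iff (s p : String) :
    PySem.Str.startswith s p = true ↔ p.toList <+: s.toList := by
  rw [PySem.Str.startswith_eq, PySem.Chars.startswith_iff]

lemma pvRemaining_toList (s p : String) :
    (PySem.Str.slice s (some (PySem.Str.len p)) none).toList = s.toList.drop p.toList.length := by
  rw [PySem.Str.toList_slice, PySem.Chars.slice_eq_listSlice, PySem.Str.len_eq,
    PySem.List.slice_from_natCast]

lemma pvFoldA (pats : List String) (hne : ∀ p ∈ pats, p ≠ "") (g : Nat)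
    (IH : ∀ (s : String) (memo : PySem.Dict String Int), s.toList.length < g → pvInv pats memo →
      (pvCountA g s pats memo).1 = pvW pats s.toList ∧ pvInv pats (pvCountA g s pats memo).2)
    (design : String) (hd : design.toList.length < g + 1) :
    ∀ (ps : List String), (∀ p ∈ ps, p ∈ pats) → ∀ (acc : Int × PySem.Dict String Int), pvInv pats acc.2 →
      (ps.foldl (fun acc pattern =>
          if PySem.Str.startswith design pattern then
            let remaining := PySem.Str.slice design (some (PySem.Str.len pattern)) none
            let res := pvCountA g remaining pats acc.2
            (acc.1 + res.1, res.2)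
          else acc) acc).1
        = acc.1 + (ps.map (fun p => if p.toList <+: design.toList then pvW pats (design.toList.drop p.toList.length) else 0)).sum
      ∧ pvInv pats (ps.foldl (fun acc pattern =>
          if PySem.Str.startswith design pattern then
            let remaining := PySem.Str.slice design (some (PySem.Str.len pattern)) none
            let res := pvCountA g remaining pats acc.2
            (acc.1 + res.1, res.2)
          else acc) acc).2 := by
  intro ps
  induction ps with
  | nil => intro _ acc hacc; exact ⟨by simp, by simpa using hacc⟩
  | cons p ps ihp =>
    intro hps acc hacc
    simp only [List.foldl_cons, List.map_cons, List.sum_cons]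
    by_cases hsw : PySem.Str.startswith design p = true
    · have hpre : p.toList <+: design.toList := (pvStartswith_iff design p).mp hsw
      have hplen : 1 ≤ p.toList.length := List.length_pos_iff.mpr (pvToList_ne_nil (hne p (hps p (by simp))))
      have hrem : (PySem.Str.slice design (some (PySem.Str.len p)) none).toList
          = design.toList.drop p.toList.length := pvRemaining_toList design p
      have hlen : (PySem.Str.slice design (some (PySem.Str.len p)) none).toList.length < g := by
        rw [hrem, List.length_drop]
        have := hpre.length_le
        omega
      have hres := IH _ acc.2 hlen hacc
      rw [if_pos hsw]
      have hstep := ihp (fun q hq => hps q (by simp [hq]))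
        ((acc.1 + (pvCountA g (PySem.Str.slice design (some (PySem.Str.len p)) none) pats acc.2).1,
          (pvCountA g (PySem.Str.slice design (some (PySem.Str.len p)) none) pats acc.2).2)) hres.2
      refine ⟨hstep.1.trans ?_, hstep.2⟩
      rw [hres.1, hrem, if_pos hpre]
      ring
    · have hpre : ¬ p.toList <+: design.toList := fun hc => hsw ((pvStartswith_iff design p).mpr hc)
      rw [if_neg hsw]
      have hstep := ihp (fun q hq => hps q (by simp [hq])) acc hacc
      refine ⟨hstep.1.trans ?_, hstep.2⟩
      rw [if_neg hpre]
      ring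

lemma pvCountA_spec (pats : List String) (hne : ∀ p ∈ pats, p ≠ "") :
    ∀ f (s : String) (memo : PySem.Dict String Int), s.toList.length < f → pvInv pats memo →
      (pvCountA f s pats memo).1 = pvW pats s.toList ∧ pvInv pats (pvCountA f s pats memo).2 := by
  intro f
  induction f with
  | zero => intro s memo h; omega
  | succ g ih =>
    intro s memo hlen hmemo
    by_cases hs : s = ""
    · subst hs
      simp only [pvCountA, if_true]
      exact ⟨by simp [pvW, pvWaysF], by simpa using hmemo⟩
    · have hsl : s.toList ≠ [] := pvToList_ne_nil hs
      have hfold := pvFoldA pats hne g ih s hlen pats (fun p hp => hp) ((0 : Int), memo) hmemo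
      have hsum : (List.foldl (fun acc pattern =>
          if PySem.Str.startswith s pattern = true then
            let remaining := PySem.Str.slice s (some (PySem.Str.len pattern)) none
            let res := pvCountA g remaining pats acc.2
            (acc.1 + res.1, res.2)
          else acc) ((0 : Int), memo) pats).1 = pvW pats s.toList := by
        rw [hfold.1, pvW_unfold' pats hne s.toList hsl]
        ring
      simp only [pvCountA, hs, if_false]
      cases hget : memo.get? s with
      | some v =>
        exact ⟨hmemo s v hget, hmemo⟩
      | none =>
        refine ⟨hsum, ?_⟩
        intro k v hkv
        rw [PySem.Dict.get?_insert] at hkv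
        by_cases hk : k = s
        · rw [if_pos hk] at hkv
          cases hkv
          rw [hsum, hk]
        · rw [if_neg hk] at hkv
          exact hfold.2 k v hkv

def pvTbl (pats : List String) (d : List Char) (i : Nat) : List Int :=
  (List.range (d.length - i + 1)).map (fun j => pvW pats (d.drop (i + j)))

lemma pvSlice_iff (s p : String) (i : Nat) :
    PySem.Str.slice s (some (i:Int)) (some ((i:Int) + PySem.Str.len p)) = p ↔ p.toList <+: s.toList.drop i := by
  rw [← String.toList_inj, PySem.Str.toList_slice, PySem.Chars.slice_eq_listSlice,
    PySem.Str.len_eq, PySem.List.slice_natCast_add, eq_comm]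
  exact List.prefix_iff_eq_take.symm

lemma pvTbl_cons (pats : List String) (d : List Char) (i : Nat) (hi : i < d.length) :
    pvTbl pats d i = pvW pats (d.drop i) :: pvTbl pats d (i+1) := by
  unfold pvTbl
  rw [show d.length - i + 1 = (d.length - (i+1) + 1) + 1 by omega, List.range_succ_eq_map]
  simp only [List.map_cons, List.map_map, Nat.add_zero]
  congr 1
  apply List.map_congr_left
  intro j _
  simp only [Function.comp_apply]
  rw [show i + (j+1) = i + 1 + j by omega]

lemma pvInner (pats : List String) (hne : ∀ p ∈ pats, p ≠ "") (s : String) (i : Nat)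
    (hi : i < s.toList.length) :
    (pats.foldl (fun total p =>
        if p ≠ "" ∧ PySem.Str.slice s (some (i:Int)) (some ((i:Int) + PySem.Str.len p)) = p
        then total + PySem.List.pyGetD (pvTbl pats s.toList (i+1)) (PySem.Str.len p - 1) 0
        else total) 0)
      = pvW pats (s.toList.drop i) := by
  have hdrop : s.toList.drop i ≠ [] := by
    intro hc
    have := congrArg List.length hc
    rw [List.length_drop, List.length_nil] at this
    omega
  have h1 : (pats.foldl (fun total p =>
        if p ≠ "" ∧ PySem.Str.slice s (some (i:Int)) (some ((i:Int) + PySem.Str.len p)) = p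
        then total + PySem.List.pyGetD (pvTbl pats s.toList (i+1)) (PySem.Str.len p - 1) 0
        else total) 0)
      = (0:Int) + (pats.map (fun p => if p.toList <+: s.toList.drop i
          then pvW pats (s.toList.drop (i + p.toList.length)) else 0)).sum := by
    rw [← PySem.List.foldl_add]
    apply PySem.List.foldl_congr_mem
    intro t p hp
    have hpne := hne p hp
    have hplen : 1 ≤ p.toList.length := List.length_pos_iff.mpr (pvToList_ne_nil hpne)
    by_cases hpre : p.toList <+: s.toList.drop i
    · have hple : p.toList.length ≤ s.toList.length - i := by
        have := hpre.length_le
        rw [List.length_drop] at this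
        exact this
      rw [if_pos ⟨hpne, (pvSlice_iff s p i).mpr hpre⟩, if_pos hpre]
      congr 1
      have hnn : (0:Int) ≤ PySem.Str.len p - 1 := by rw [PySem.Str.len_eq]; omega
      rw [PySem.List.pyGetD_of_nonneg _ _ hnn,
        show (PySem.Str.len p - 1).toNat = p.toList.length - 1 by rw [PySem.Str.len_eq]; omega]
      unfold pvTbl
      rw [PySem.List.getD_map_range _ _ _ _ (by omega)]
      rw [show i + 1 + (p.toList.length - 1) = i + p.toList.length by omega]
    · rw [if_neg (fun hc => hpre ((pvSlice_iff s p i).mp hc.2)), if_neg hpre]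
      ring
  rw [h1, pvW_unfold' pats hne _ hdrop, zero_add]
  congr 1
  apply List.map_congr_left
  intro p hp
  by_cases hpre : p.toList <+: s.toList.drop i
  · rw [if_pos hpre, if_pos hpre, List.drop_drop]
  · rw [if_neg hpre, if_neg hpre]

lemma pvLoop (pats : List String) (hne : ∀ p ∈ pats, p ≠ "") (s : String) :
    ∀ i, i ≤ s.toList.length →
      List.foldl (fun dp ii =>
        (pats.foldl (fun total p =>
          if p ≠ "" ∧ PySem.Str.slice s (some ii) (some (ii + PySem.Str.len p)) = p
          then total + PySem.List.pyGetD dp (PySem.Str.len p - 1) 0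
          else total) 0) :: dp)
        (pvTbl pats s.toList i) (PySem.List.pyRange ((i:Int) - 1) (-1) (-1))
      = pvTbl pats s.toList 0 := by
  intro i
  induction i with
  | zero =>
    intro _
    rw [show ((0:Nat):Int) - 1 = -1 by norm_num, PySem.List.pyRange_neg_one_eq_nil (le_refl _)]
    rfl
  | succ i ih =>
    intro hle
    rw [show ((i+1:Nat):Int) - 1 = (i:Int) by push_cast; ring,
      PySem.List.pyRange_neg_one_cons (by omega : (-1:Int) < (i:Int)), List.foldl_cons]
    have hstep : (pats.foldl (fun total p =>
          if p ≠ "" ∧ PySem.Str.slice s (some ((i:Int))) (some ((i:Int) + PySem.Str.len p)) = p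
          then total + PySem.List.pyGetD (pvTbl pats s.toList (i+1)) (PySem.Str.len p - 1) 0
          else total) 0) :: pvTbl pats s.toList (i+1) = pvTbl pats s.toList i := by
      rw [pvInner pats hne s i (by omega), pvTbl_cons pats s.toList i (by omega)]
    rw [hstep]
    exact ih (by omega)

lemma pvWaysB_eq (pats : List String) (hne : ∀ p ∈ pats, p ≠ "") (s : String) :
    pvWaysB pats s = pvW pats s.toList := by
  unfold pvWaysB
  have hinit : [(1:Int)] = pvTbl pats s.toList s.toList.length := by
    unfold pvTbl
    simp [pvW, pvWaysF]
  rw [PySem.Str.len_eq, hinit, pvLoop pats hne s s.toList.length (le_refl _)]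
  rw [PySem.List.pyGetD_of_nonneg _ _ (by norm_num : (0:Int) ≤ 0)]
  unfold pvTbl
  rw [show ((0:Int)).toNat = 0 from rfl, PySem.List.getD_map_range _ _ _ _ (by omega)]
  simp

lemma pvWays_agree (pats : List String) (design : String) (h : "" ∈ pats → design = "") :
    (pvCountA (design.toList.length + 1) design pats PySem.Dict.empty).1 = pvWaysB pats design := by
  by_cases hm : "" ∈ pats
  · have hd : design = "" := h hm
    subst hd
    have hA : (pvCountA ("".toList.length + 1) "" pats PySem.Dict.empty).1 = 1 := by
      simp [pvCountA]
    have hB : pvWaysB pats "" = 1 := by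
      unfold pvWaysB
      rw [show PySem.Str.len "" - 1 = (-1 : Int) by decide,
        PySem.List.pyRange_neg_one_eq_nil (le_refl _)]
      rfl
    rw [hA, hB]
  · have hne : ∀ p ∈ pats, p ≠ "" := fun p hp he => hm (he ▸ hp)
    have hA := pvCountA_spec pats hne (design.toList.length + 1) design PySem.Dict.empty
      (by omega) (by intro k v hv; simp [PySem.Dict.get?_empty] at hv)
    rw [hA.1, pvWaysB_eq pats hne design]

-- ===== VERDICT (by name: the statement is the Claim_ definition above) =====
theorem analyze_designs_spec : Claim_equal_analyze_designs := by
  intro pats designs _ hpre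
  unfold Spec_analyze_designs analyze_designs analyze_designs_alt
  have heq : designs.foldl (fun (acc : Int × Int × PySem.Dict String Int) design =>
      let ways := (pvCountA (design.toList.length + 1) design pats PySem.Dict.empty).1
      let acc' := if ways > 0 then (acc.1 + 1, acc.2.1 + ways) else (acc.1, acc.2.1)
      (acc'.1, acc'.2, acc.2.2.insert design ways)) ((0 : Int), (0 : Int), PySem.Dict.empty)
    = designs.foldl (fun (acc : Int × Int × PySem.Dict String Int) design =>
      let ways := pvWaysB pats design
      let acc' := if ways > 0 then (acc.1 + 1, acc.2.1 + ways) else (acc.1, acc.2.1)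
      (acc'.1, acc'.2, acc.2.2.insert design ways)) ((0 : Int), (0 : Int), PySem.Dict.empty) := by
    apply PySem.List.foldl_congr_mem
    intro acc design hdmem
    simp only
    rw [pvWays_agree pats design (fun he => hpre he design hdmem)]
  rw [heq]
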